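/- GENERATED by farm/mkstatement.py from design/units.tsv (unit `DGifOpen.P`) and the assertions of Gif/Spec/Seg_DGifOpen.lean — do not edit.
   THE STATEMENT of the proof unit `DGifOpen.P`: segment P of `DGifOpen` (17 instructions; entries 0x108680;
   exits 0x1086d0; ranges 0x108680-0x1086d0)
   takes each of its entry assertions to one of its exit assertions (`Gif.Spec.DGifOpen.SegP`), given the contracts of its callees.
   What the names mean: ProgX/Base/Spec/Basic.lean (the shared hypotheses), Gif/Spec/Seg_DGifOpen.lean (the assertions). The theorem to prove:
   `theorem DGifOpen_P_ok : Gif.Spec.DGifOpen_P.Statement`. -/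
import Gif.Code
import Gif.Dec.All
import Gif.Labels
import Gif.Spec.Seg_DGifOpen
namespace Gif.Spec.DGifOpen_P
open X86 X86.User Asan

/-- The statement of unit `DGifOpen.P`. -/
def Statement : Prop :=
  ∀ (Lay : Layout) (_hLay : Lay.hi = 0x1000000) (μ : Microarch) (_hμ : UserX.MicroOK μ) (u₀ : State)
    (_hcode : HasCodeNat Lay u₀ Gif.L.DGifOpen.entry Gif.Code.code_DGifOpen.nat Gif.L.DGifOpen.size),
    Gif.Spec.DGifOpen.SegP Lay μ u₀

end Gif.Spec.DGifOpen_P
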